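-- pv_equiv track=rewrite | github.com/AkashDeveloper8758/dsa_implementations | DSA_part_2/bst/problems.py | itemsToBeSwapped
-- ===== SOURCE A (Python) =====
-- import math
--
-- def itemsToBeSwapped(arr:list):
--     first = second = None
--     prev = -math.inf
--     for i in range(len(arr)):
--         if arr[i] < prev:
--             if first == None:
--                 first = prev
--             second = arr[i]
--         prev = arr[i]
--     return [first,second]
-- ===== SOURCE B (Python) =====
-- def itemsToBeSwapped(arr: list):
--     first = None
--     for i in range(1, len(arr)):
--         if arr[i] < arr[i - 1]:
--             first = arr[i - 1]
--             break
--     second = None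
--     for j in range(len(arr) - 1, 0, -1):
--         if arr[j] < arr[j - 1]:
--             second = arr[j]
--             break
--     return [first, second]
-- ===== Notes on version B (the rewrite author's own statement) =====
-- stated objective: alternative
-- what changed: Replaced the single accumulating pass (first/second/prev state with a -inf sentinel) by two independent early-exit scans: a forward scan finding the predecessor at the first descent and a backward scan finding the value at the last descent.
import Mathlib
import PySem

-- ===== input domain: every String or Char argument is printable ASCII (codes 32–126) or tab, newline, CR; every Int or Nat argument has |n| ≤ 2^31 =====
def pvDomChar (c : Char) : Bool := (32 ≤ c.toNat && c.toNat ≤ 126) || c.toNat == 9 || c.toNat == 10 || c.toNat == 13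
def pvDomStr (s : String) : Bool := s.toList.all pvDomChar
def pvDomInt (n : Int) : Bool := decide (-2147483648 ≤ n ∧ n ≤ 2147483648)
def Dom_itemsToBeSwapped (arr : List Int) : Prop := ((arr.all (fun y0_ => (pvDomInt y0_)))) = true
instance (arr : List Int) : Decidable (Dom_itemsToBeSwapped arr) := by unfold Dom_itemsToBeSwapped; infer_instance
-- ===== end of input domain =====

-- B replaces A's single accumulating pass (first/second/prev with a -inf sentinel) by two
-- independent early-exit scans over consecutive pairs (forward for first, backward for second);
-- same O(n) cost, different decomposition.

-- ===== PORT A =====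
-- Step function of A's loop: state (first, second, prev); prev = none plays the role of -math.inf
def stepA (st : Option Int × Option Int × Option Int) (a : Int) : Option Int × Option Int × Option Int :=
  match st with
  | (first, second, prev) =>
    if (match prev with | none => false | some p => a < p) then
      ((if first = none then prev else first), some a, some a)
    else (first, second, some a)

def itemsToBeSwapped (arr : List Int) : List (Option Int) :=
  match arr.foldl stepA (none, none, none) with
  | (first, second, _) => [first, second]

-- ===== PORT B =====
-- forward scan: first i with arr[i] < arr[i-1], return arr[i-1]
def firstDesc (p : Int) : List Int → Option Int
  | [] => none
  | a :: t => if a < p then some p else firstDesc a t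

-- backward scan: last j with arr[j] < arr[j-1], return arr[j] (structural recursion preferring the later descent)
def lastDesc (p : Int) : List Int → Option Int
  | [] => none
  | a :: t =>
    match lastDesc a t with
    | some x => some x
    | none => if a < p then some a else none

def itemsToBeSwapped_alt (arr : List Int) : List (Option Int) :=
  match arr with
  | [] => [none, none]
  | a :: t => [firstDesc a t, lastDesc a t]

-- ===== PRECONDITION & SPEC =====
def Spec_itemsToBeSwapped (arr : List Int) (out : List (Option Int)) : Prop := out = itemsToBeSwapped_alt arr
instance (arr : List Int) (out : List (Option Int)) : Decidable (Spec_itemsToBeSwapped arr out) := by unfold Spec_itemsToBeSwapped; infer_instance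

-- ===== CLAIM (what is proved, stated in full; the proofs are below) =====
def Claim_equal_itemsToBeSwapped : Prop := ∀ (arr : List Int), Dom_itemsToBeSwapped arr → Spec_itemsToBeSwapped arr (itemsToBeSwapped arr)

-- ===== LEMMAS AND PROOFS =====

-- The prev component of A's state after the loop is the last element seen.
theorem getLastD_shift (a p : Int) (t : List Int) : t.getLast?.getD a = (a :: t).getLast?.getD p := by
  cases t with
  | nil => rfl
  | cons b u =>
    rcases h : (b :: u).getLast? with _ | x
    · simp at h
    · simp [h]

-- Once first/second are set, A's loop keeps first and tracks only the last descent for second.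
theorem loopA_set (t : List Int) : ∀ (p f s : Int),
    t.foldl stepA (some f, some s, some p) =
      (some f, some ((lastDesc p t).getD s), some (t.getLastD p)) := by
  induction t with
  | nil => intro p f s; simp [lastDesc]
  | cons a t ih =>
    intro p f s
    by_cases h : a < p <;>
      simp [stepA, h, ih, lastDesc] <;>
      cases lastDesc a t <;> simp <;> exact getLastD_shift a p t

-- From the untouched state, A's loop computes exactly B's two scans.
theorem loopA_none (t : List Int) : ∀ (p : Int),
    t.foldl stepA (none, none, some p) =
      (firstDesc p t, lastDesc p t, some (t.getLastD p)) := by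
  induction t with
  | nil => intro p; simp [firstDesc, lastDesc]
  | cons a t ih =>
    intro p
    by_cases h : a < p
    · simp [stepA, h, loopA_set, firstDesc, lastDesc]
      cases lastDesc a t <;> simp <;> exact getLastD_shift a p t
    · simp [stepA, h, ih, firstDesc, lastDesc]
      cases lastDesc a t <;> simp <;> exact getLastD_shift a p t

-- ===== VERDICT (by name: the statement is the Claim_ definition above) =====
theorem itemsToBeSwapped_spec : Claim_equal_itemsToBeSwapped := by
  intro arr _
  unfold Spec_itemsToBeSwapped itemsToBeSwapped itemsToBeSwapped_alt
  cases arr with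
  | nil => rfl
  | cons a t => simp [stepA, loopA_none]
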